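-- pv_equiv track=rewrite | github.com/gurjy0t/advent-of-code-2021 | Day03/puzzle2.py | get_least_at
-- ===== SOURCE A (Python) =====
-- def get_least_at(nums, pos):
--     seen0, seen1 = 0, 0
--     zeros, ones = [], []
--
--     i=0
--     while(i<len(nums)):
--         if nums[i][pos]=='0':
--             zeros.append(nums[i])
--             seen0+=1
--         else:
--             ones.append(nums[i])
--             seen1+=1
--         i+=1
--
--     if seen0 > seen1:
--         return ones
--     else:
--         return zeros
-- ===== SOURCE B (Python) =====
-- def get_least_at(nums, pos):
--     count0 = sum(1 for n in nums if n[pos] == '0')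
--     if count0 > len(nums) - count0:
--         return [n for n in nums if n[pos] != '0']
--     return [n for n in nums if n[pos] == '0']
-- ===== Notes on version B (the rewrite author's own statement) =====
-- stated objective: simpler
-- what changed: B replaces A's index-driven while loop that materializes both partition lists and two counters with a counting pass (count of '0'-bit strings) followed by a single filter for the losing bit.
import Mathlib
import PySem

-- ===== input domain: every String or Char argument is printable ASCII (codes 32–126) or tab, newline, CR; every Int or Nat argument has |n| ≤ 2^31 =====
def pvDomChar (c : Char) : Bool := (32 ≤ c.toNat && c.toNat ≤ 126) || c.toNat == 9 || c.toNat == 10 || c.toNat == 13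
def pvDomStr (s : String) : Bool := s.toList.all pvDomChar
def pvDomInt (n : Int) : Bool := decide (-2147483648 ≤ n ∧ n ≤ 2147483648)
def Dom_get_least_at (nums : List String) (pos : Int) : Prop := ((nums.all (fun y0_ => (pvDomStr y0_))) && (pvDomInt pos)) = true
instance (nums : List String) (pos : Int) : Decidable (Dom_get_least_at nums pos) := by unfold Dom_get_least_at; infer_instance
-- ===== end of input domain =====

-- B replaces A's while loop maintaining two counters and two partition lists by a counting
-- pass followed by a single filter for the losing bit (objective: simpler).

-- s[pos] in total form ('.getD'); exact under Pre_, which makes the index in range.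
def pvCharAt (s : String) (pos : Int) : Char := (PySem.Str.pyGet? s pos).getD ' '

-- ===== PORT A =====
def get_least_at (nums : List String) (pos : Int) : List String :=
  let st := nums.foldl
    (fun (st : Int × Int × List String × List String) n =>
      if pvCharAt n pos = '0' then (st.1 + 1, st.2.1, st.2.2.1 ++ [n], st.2.2.2)
      else (st.1, st.2.1 + 1, st.2.2.1, st.2.2.2 ++ [n]))
    (0, 0, [], [])
  if st.1 > st.2.1 then st.2.2.2 else st.2.2.1

-- ===== PORT B =====
def get_least_at_alt (nums : List String) (pos : Int) : List String :=
  let count0 : Int := nums.countP (fun n => pvCharAt n pos == '0')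
  if count0 > (nums.length : Int) - count0 then nums.filter (fun n => !(pvCharAt n pos == '0'))
  else nums.filter (fun n => pvCharAt n pos == '0')

-- ===== PRECONDITION & SPEC =====
-- Pre_ excludes exactly the inputs where Python A raises IndexError: some string too short for pos.
def Pre_get_least_at (nums : List String) (pos : Int) : Prop :=
  ∀ s ∈ nums, PySem.Raise.InRange s.length pos
instance (nums : List String) (pos : Int) : Decidable (Pre_get_least_at nums pos) := by unfold Pre_get_least_at; infer_instance
def pvWitness_get_least_at : List String × Int := (["10", "01", "11"], 0)

def Spec_get_least_at (nums : List String) (pos : Int) (out : List String) : Prop := out = get_least_at_alt nums pos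
instance (nums : List String) (pos : Int) (out : List String) : Decidable (Spec_get_least_at nums pos out) := by unfold Spec_get_least_at; infer_instance

-- ===== CLAIM (what is proved, stated in full; the proofs are below) =====
def Claim_equal_get_least_at : Prop := ∀ (nums : List String) (pos : Int), Dom_get_least_at nums pos → Pre_get_least_at nums pos → Spec_get_least_at nums pos (get_least_at nums pos)

-- ===== LEMMAS AND PROOFS =====

theorem get_least_at_loop (pos : Int) (nums : List String) (a b : Int) (zs os : List String) :
    nums.foldl
      (fun (st : Int × Int × List String × List String) n =>
        if pvCharAt n pos = '0' then (st.1 + 1, st.2.1, st.2.2.1 ++ [n], st.2.2.2)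
        else (st.1, st.2.1 + 1, st.2.2.1, st.2.2.2 ++ [n]))
      (a, b, zs, os)
    = (a + nums.countP (fun n => pvCharAt n pos == '0'),
       b + nums.countP (fun n => !(pvCharAt n pos == '0')),
       zs ++ nums.filter (fun n => pvCharAt n pos == '0'),
       os ++ nums.filter (fun n => !(pvCharAt n pos == '0'))) := by
  induction nums generalizing a b zs os with
  | nil => simp
  | cons x xs ih =>
    by_cases h : pvCharAt x pos = '0' <;>
      simp [List.foldl_cons, h, ih] <;> ring_nf

theorem get_least_at_spec : Claim_equal_get_least_at := by
  intro nums pos _ _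
  unfold Spec_get_least_at get_least_at get_least_at_alt
  rw [get_least_at_loop]
  have hc : nums.countP (fun a => decide ¬(pvCharAt a pos == '0') = true)
      = nums.countP (fun n => !(pvCharAt n pos == '0')) := by
    apply List.countP_congr; intro x _; simp
  have hlen : nums.length = nums.countP (fun n => pvCharAt n pos == '0')
      + nums.countP (fun n => !(pvCharAt n pos == '0')) := by
    rw [← hc]; exact List.length_eq_countP_add_countP _
  simp only [Int.zero_add]
  by_cases h : ((nums.countP (fun n => pvCharAt n pos == '0') : Int)
      > (nums.countP (fun n => !(pvCharAt n pos == '0')) : Int))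
  · rw [if_pos h, if_pos (by omega)]; simp
  · rw [if_neg h, if_neg (by omega)]; simp
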